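-- pv_equiv track=rewrite | github.com/thoreausawyer/algorithm_study | 프로그래머스/0/120815. 피자 나눠 먹기 （2）/피자 나눠 먹기 （2）.py | solution
-- ===== SOURCE A (Python) =====
-- def solution(n):
--     answer = 0
--     a = 1
--     b = 1
--     while True:
--         if n == 6:
--             answer += 1
--             break
--         if n * a <= 6 * b:
--             a += 1
--         else:
--             b += 1
--             answer += 1
--         if n * a == 6 * b:
--             answer += 1
--             break
--     return answer
-- ===== SOURCE B (Python) =====
-- def solution(n):
--     # min pizzas = lcm(n, 6) / 6 = n / gcd(n, 6), via Euclid's algorithm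
--     g, r = n, 6
--     while r:
--         g, r = r, g % r
--     return n // g
-- ===== Notes on version B (the rewrite author's own statement) =====
-- stated objective: faster
-- what changed: Replaces A's step-by-step simulation that increments counters until n*a == 6*b (O(n) iterations) with the closed form n // gcd(n, 6) computed by Euclid's algorithm.
-- outside the precondition, e.g. on solution(0): A does not finish within the time limit, B returns 0
import Mathlib
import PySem

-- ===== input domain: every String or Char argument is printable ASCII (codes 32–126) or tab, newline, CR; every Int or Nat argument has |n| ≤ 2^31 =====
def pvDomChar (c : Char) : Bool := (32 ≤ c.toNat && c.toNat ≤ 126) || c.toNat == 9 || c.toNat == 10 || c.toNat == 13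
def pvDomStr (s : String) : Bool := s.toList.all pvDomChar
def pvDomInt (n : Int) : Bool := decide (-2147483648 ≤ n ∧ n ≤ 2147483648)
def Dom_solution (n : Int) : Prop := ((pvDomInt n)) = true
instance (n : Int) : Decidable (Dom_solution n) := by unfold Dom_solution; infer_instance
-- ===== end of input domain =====

-- B replaces A's O(n) step-by-step simulation with the closed form n // gcd(n, 6) via Euclid's algorithm (asymptotically faster).

-- ===== PORT A =====
-- A's 'while True' loop, transliterated with explicit fuel: under Pre_ (1 ≤ n) the loop
-- runs at most n + 4 iterations (proved below), so fuel (7 + n).toNat is never exhausted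
-- and the port is exact on Pre_. For n ≤ 0 the Python loop never terminates (excluded by Pre_).
def solutionLoop (n : Int) : Nat → Int → Int → Int → Int
  | 0, _, _, answer => answer
  | fuel + 1, a, b, answer =>
    if n = 6 then answer + 1
    else
      let s := if n * a ≤ 6 * b then (a + 1, b, answer) else (a, b + 1, answer + 1)
      if n * s.1 = 6 * s.2.1 then s.2.2 + 1
      else solutionLoop n fuel s.1 s.2.1 s.2.2

def solution (n : Int) : Int := solutionLoop n (7 + n).toNat 1 1 0

-- ===== PORT B =====
-- Euclid's gcd loop: 'while r: g, r = r, g % r'; terminates since |g % r| < |r| for r ≠ 0.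
def gcdLoop (g r : Int) : Int :=
  if h : r = 0 then g
  else gcdLoop r (PySem.Int.mod g r)
termination_by r.natAbs
decreasing_by
  rcases lt_or_gt_of_ne h with hneg | hpos
  · have h1 := PySem.Int.mod_neg_bounds g hneg
    omega
  · have h1 := PySem.Int.mod_nonneg g hpos
    have h2 := PySem.Int.mod_lt g hpos
    omega

def solution_alt (n : Int) : Int := PySem.Int.floordiv n (gcdLoop n 6)

-- ===== PRECONDITION & SPEC =====
-- Pre_ excludes n ≤ 0: there A's while-loop never terminates (a += 1 forever), so A returns no value.
def Pre_solution (n : Int) : Prop := 1 ≤ n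
instance (n : Int) : Decidable (Pre_solution n) := by unfold Pre_solution; infer_instance
def pvWitness_solution : Int := 10

def Spec_solution (n : Int) (out : Int) : Prop := out = solution_alt n
instance (n : Int) (out : Int) : Decidable (Spec_solution n out) := by unfold Spec_solution; infer_instance

-- ===== CLAIM (what is proved, stated in full; the proofs are below) =====
def Claim_equal_solution : Prop := ∀ (n : Int), Dom_solution n → Pre_solution n → Spec_solution n (solution n)

-- ===== LEMMAS AND PROOFS =====

-- The loop invariant: with (A*, B*) the least positive solution of n * A* = 6 * B*
-- (minimality given by hmin), from any in-range state the loop returns answer + (B* - b) + 1.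
lemma solutionLoop_eq (n As Bs : Int) (hn : 1 ≤ n)
    (hAs : 1 ≤ As) (hBs : 1 ≤ Bs) (heq : n * As = 6 * Bs)
    (hmin : ∀ a b : Int, 1 ≤ a → a ≤ As → 1 ≤ b → b ≤ Bs → n * a = 6 * b → a = As ∧ b = Bs) :
    ∀ (fuel : Nat) (a b answer : Int), 1 ≤ a → a ≤ As → 1 ≤ b → b ≤ Bs →
      (n = 6 ∨ n * a ≠ 6 * b) → (As - a + (Bs - b)).toNat < fuel →
      solutionLoop n fuel a b answer = answer + (Bs - b) + 1 := by
  intro fuel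
  induction fuel with
  | zero => intro a b answer _ _ _ _ _ hf; omega
  | succ fuel ih =>
    intro a b answer ha1 ha2 hb1 hb2 hne hf
    by_cases h6 : n = 6
    · -- immediate break; invariant + minimality force b = Bs
      have : (1 : Int) = As ∧ (1 : Int) = Bs := hmin 1 1 le_rfl hAs le_rfl hBs (by omega)
      simp only [solutionLoop, if_pos h6]
      omega
    · have hne' : n * a ≠ 6 * b := by tauto
      simp only [solutionLoop, if_neg h6]
      by_cases hc : n * a ≤ 6 * b
      · -- a += 1 branch
        have hlt : n * a < 6 * b := lt_of_le_of_ne hc hne'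
        -- a + 1 ≤ As : if a = As then n * a = 6 * Bs ≥ 6 * b, contradicting hlt
        have haA : a + 1 ≤ As := by
          rcases lt_or_eq_of_le ha2 with h | h
          · omega
          · exfalso; rw [h] at hlt; nlinarith
        simp only [if_pos hc]
        by_cases hbrk : n * (a + 1) = 6 * b
        · have := hmin (a + 1) b (by omega) haA hb1 hb2 hbrk
          simp only [if_pos hbrk]
          omega
        · simp only [if_neg hbrk]
          rw [ih (a + 1) b answer (by omega) haA hb1 hb2 (Or.inr hbrk) (by omega)]
      · -- b += 1 branch
        have hgt : 6 * b < n * a := by omega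
        have hbB : b + 1 ≤ Bs := by
          rcases lt_or_eq_of_le hb2 with h | h
          · omega
          · exfalso; rw [h] at hgt; nlinarith
        simp only [if_neg hc]
        by_cases hbrk : n * a = 6 * (b + 1)
        · have := hmin a (b + 1) ha1 ha2 (by omega) hbB hbrk
          simp only [if_pos hbrk]
          omega
        · simp only [if_neg hbrk]
          rw [ih a (b + 1) (answer + 1) ha1 ha2 (by omega) hbB (Or.inr hbrk) (by omega)]
          ring

-- A returns Bs = the least positive b with 6 ∣ n * b / ... i.e. n / gcd(n,6), given the pair (As, Bs).
lemma solution_eq (n As Bs : Int) (hn : 1 ≤ n)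
    (hAs : 1 ≤ As) (hA6 : As ≤ 6) (hBs : 1 ≤ Bs) (hBn : Bs ≤ n) (heq : n * As = 6 * Bs)
    (hmin : ∀ a b : Int, 1 ≤ a → a ≤ As → 1 ≤ b → b ≤ Bs → n * a = 6 * b → a = As ∧ b = Bs) :
    solution n = Bs := by
  have h6 : (1 : Int) ≤ 6 * Bs := by omega
  have := solutionLoop_eq n As Bs hn hAs hBs heq hmin (7 + n).toNat 1 1 0
    le_rfl hAs le_rfl hBs
    (by rcases eq_or_ne n 6 with h | h
        · exact Or.inl h
        · exact Or.inr (by omega))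
    (by omega)
  unfold solution
  omega

-- B computes n // gcd(n, 6); unfold Euclid on the concrete second argument per residue class.
lemma gcdLoop_zero (g : Int) : gcdLoop g 0 = g := by
  rw [gcdLoop]
  simp

lemma gcdLoop_step (g r : Int) (h : r ≠ 0) : gcdLoop g r = gcdLoop r (PySem.Int.mod g r) := by
  rw [gcdLoop]
  simp [h]

lemma gcdLoop_n_six (n : Int) (r : Int) (hr : PySem.Int.mod n 6 = r) :
    gcdLoop n 6 = gcdLoop 6 r := by
  rw [gcdLoop_step n 6 (by norm_num), hr]

theorem solution_spec : Claim_equal_solution := by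
  unfold Claim_equal_solution
  intro n _hdom hn
  unfold Spec_solution Pre_solution at *
  have hmod := PySem.Int.mod_nonneg n (show (0:Int) < 6 by norm_num)
  have hmodlt := PySem.Int.mod_lt n (show (0:Int) < 6 by norm_num)
  have hdm := PySem.Int.floordiv_mul_add_mod n 6
  set r := PySem.Int.mod n 6 with hr
  set q := PySem.Int.floordiv n 6 with hq
  have hnq : q * 6 + r = n := hdm
  have hdiv : ∀ (g v : Int), 0 < g → v * g ≤ n → n < (v + 1) * g → PySem.Int.floordiv n g = v := by
    intro g v hg h1 h2
    rw [PySem.Int.floordiv_eq_iff_of_pos hg]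
    exact ⟨h1, h2⟩
  interval_cases r
  all_goals rw [solution_alt, gcdLoop_n_six n _ hr.symm]
  · -- n % 6 = 0: gcd = 6, result n // 6 = q
    rw [gcdLoop_zero,
      solution_eq n 1 q hn le_rfl (by norm_num) (by omega) (by omega) (by omega)
        (by intro a b h1 h2 h3 h4 h5; interval_cases a <;> omega),
      hdiv 6 q (by norm_num) (by omega) (by omega)]
  · -- n % 6 = 1: gcd = 1, result n
    rw [show gcdLoop 6 1 = 1 from by
        rw [gcdLoop_step 6 1 (by norm_num), show PySem.Int.mod 6 1 = 0 from by decide, gcdLoop_zero],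
      solution_eq n 6 n hn (by norm_num) le_rfl hn le_rfl (by ring)
        (by intro a b h1 h2 h3 h4 h5; interval_cases a <;> omega),
      hdiv 1 n (by norm_num) (by omega) (by omega)]
  · -- n % 6 = 2: gcd = 2, result n // 2 = 3q + 1
    rw [show gcdLoop 6 2 = 2 from by
        rw [gcdLoop_step 6 2 (by norm_num), show PySem.Int.mod 6 2 = 0 from by decide, gcdLoop_zero],
      solution_eq n 3 (3 * q + 1) hn (by norm_num) (by norm_num) (by omega) (by omega) (by omega)
        (by intro a b h1 h2 h3 h4 h5; interval_cases a <;> omega),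
      hdiv 2 (3 * q + 1) (by norm_num) (by omega) (by omega)]
  · -- n % 6 = 3: gcd = 3, result n // 3 = 2q + 1
    rw [show gcdLoop 6 3 = 3 from by
        rw [gcdLoop_step 6 3 (by norm_num), show PySem.Int.mod 6 3 = 0 from by decide, gcdLoop_zero],
      solution_eq n 2 (2 * q + 1) hn (by norm_num) (by norm_num) (by omega) (by omega) (by omega)
        (by intro a b h1 h2 h3 h4 h5; interval_cases a <;> omega),
      hdiv 3 (2 * q + 1) (by norm_num) (by omega) (by omega)]
  · -- n % 6 = 4: gcd = 2, result n // 2 = 3q + 2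
    rw [show gcdLoop 6 4 = 2 from by
        rw [gcdLoop_step 6 4 (by norm_num), show PySem.Int.mod 6 4 = 2 from by decide,
          gcdLoop_step 4 2 (by norm_num), show PySem.Int.mod 4 2 = 0 from by decide, gcdLoop_zero],
      solution_eq n 3 (3 * q + 2) hn (by norm_num) (by norm_num) (by omega) (by omega) (by omega)
        (by intro a b h1 h2 h3 h4 h5; interval_cases a <;> omega),
      hdiv 2 (3 * q + 2) (by norm_num) (by omega) (by omega)]
  · -- n % 6 = 5: gcd = 1, result n
    rw [show gcdLoop 6 5 = 1 from by
        rw [gcdLoop_step 6 5 (by norm_num), show PySem.Int.mod 6 5 = 1 from by decide,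
          gcdLoop_step 5 1 (by norm_num), show PySem.Int.mod 5 1 = 0 from by decide, gcdLoop_zero],
      solution_eq n 6 n hn (by norm_num) le_rfl hn le_rfl (by ring)
        (by intro a b h1 h2 h3 h4 h5; interval_cases a <;> omega),
      hdiv 1 n (by norm_num) (by omega) (by omega)]
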